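-- pv_equiv track=rewrite | github.com/ewhacote/ewhaCote_minju | 0718_택배 배달과 수거.py | solution
-- ===== SOURCE A (Python) =====
-- def solution(capacity, num_of_stops, deliveries, pickups):
--     total_time = 0
--     while True:
--         while len(deliveries) > 0 and deliveries[-1] == 0:
--             deliveries.pop()
--         while len(pickups) > 0 and pickups[-1] == 0:
--             pickups.pop()
--
--         if len(deliveries) == 0 and len(pickups) == 0:
--             break
--
--         total_time += max(len(deliveries), len(pickups))*2
--         remaining_capacity = capacity
--
--         while len(deliveries) > 0 and remaining_capacity > 0:
--             if deliveries[-1] > remaining_capacity: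
--                 deliveries[-1] -= remaining_capacity
--                 break
--             remaining_capacity -= deliveries.pop()
--
--         remaining_capacity = capacity
--
--         while len(pickups) > 0 and remaining_capacity > 0:
--             if pickups[-1] > remaining_capacity:
--                 pickups[-1] -= remaining_capacity
--                 break
--             remaining_capacity -= pickups.pop()
--     return total_time
-- ===== SOURCE B (Python) =====
-- def solution(capacity, num_of_stops, deliveries, pickups):
--     # Serve each route independently with a two-pointer backward scan over a local
--     # reversed copy (no mutation of the arguments), collecting how far each trip
--     # must reach; then combine the two length sequences by summing per-trip maxima.
--     def trip_lengths(items):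
--         rev = items[::-1]
--         n = len(rev)
--         k = 0
--         res = []
--         while True:
--             while k < n and rev[k] == 0:
--                 k += 1
--             if k == n:
--                 return res
--             res.append(n - k)
--             rem = capacity
--             while k < n and rem > 0:
--                 v = rev[k]
--                 if v > rem:
--                     rev[k] = v - rem
--                     break
--                 rem -= v
--                 k += 1
--
--     lens_d = trip_lengths(deliveries)
--     lens_p = trip_lengths(pickups)
--     total = 0
--     for t in range(max(len(lens_d), len(lens_p))):
--         a = lens_d[t] if t < len(lens_d) else 0
--         b = lens_p[t] if t < len(lens_p) else 0
--         total += 2 * max(a, b)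
--     return total
-- ===== Notes on version B (the rewrite author's own statement) =====
-- stated objective: alternative
-- what changed: B serves the two routes independently - each with a two-pointer backward scan over a local reversed copy, collecting how far every trip must reach - and then sums per-trip maxima of the two length sequences, instead of A's single loop that interleaves both lists and consumes them with destructive pops.
import Mathlib
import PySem

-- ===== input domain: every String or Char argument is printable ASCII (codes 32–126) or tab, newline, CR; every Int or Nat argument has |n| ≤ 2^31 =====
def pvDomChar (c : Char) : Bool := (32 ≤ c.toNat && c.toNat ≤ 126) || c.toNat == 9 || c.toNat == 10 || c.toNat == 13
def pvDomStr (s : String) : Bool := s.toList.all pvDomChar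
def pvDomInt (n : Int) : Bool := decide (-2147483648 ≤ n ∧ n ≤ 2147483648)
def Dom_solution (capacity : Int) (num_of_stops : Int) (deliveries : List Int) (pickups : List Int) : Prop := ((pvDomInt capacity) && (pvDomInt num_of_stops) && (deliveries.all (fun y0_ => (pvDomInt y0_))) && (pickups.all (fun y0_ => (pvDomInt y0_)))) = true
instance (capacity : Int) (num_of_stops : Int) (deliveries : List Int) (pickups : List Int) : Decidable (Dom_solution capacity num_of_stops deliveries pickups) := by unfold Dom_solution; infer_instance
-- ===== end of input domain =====

-- B serves the two routes independently (two-pointer backward scan on a local reversed copy,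
-- arguments untouched) and merges the per-trip reach lengths, instead of A's single loop with
-- destructive pops on both lists; A mutates its list arguments (pops) — the equivalence proved
-- here is about the return value only.


-- ===== PORT A =====
-- `while len(l) > 0 and l[-1] == 0: l.pop()`
def trimA (l : List Int) : List Int :=
  if h : l.getLast? = some 0 then trimA l.dropLast else l
termination_by l.length
decreasing_by
  have hne : l ≠ [] := by intro hnil; simp [hnil] at h
  have := List.length_pos_of_ne_nil hne
  rw [List.length_dropLast]; omega

-- the inner `while len(l) > 0 and remaining_capacity > 0: …` loop (pop from the end,
-- or decrement the last element and break)
def serveA (rem : Int) (l : List Int) : List Int :=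
  if h : l ≠ [] ∧ 0 < rem then
    let x := l.getLast h.1
    if x > rem then l.dropLast ++ [x - rem]
    else serveA (rem - x) l.dropLast
  else l
termination_by l.length
decreasing_by
  have := List.length_pos_of_ne_nil h.1
  rw [List.length_dropLast]; omega

-- the `while True:` loop; the fuel only makes it total in Lean (under Pre_solution it is
-- never exhausted, proved below) — with capacity ≤ 0 and any nonzero demand the Python loops forever
def loopA (c : Int) (fuel : Nat) (ds ps : List Int) (total : Int) : Int :=
  match fuel with
  | 0 => total
  | fuel + 1 =>
    let ds' := trimA ds
    let ps' := trimA ps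
    if ds' = [] ∧ ps' = [] then total
    else loopA c fuel (serveA c ds') (serveA c ps')
           (total + 2 * (max ds'.length ps'.length : Int))

def solution (capacity : Int) (num_of_stops : Int) (deliveries : List Int) (pickups : List Int) : Int :=
  loopA capacity ((deliveries.map Int.natAbs).sum + (pickups.map Int.natAbs).sum + 1) deliveries pickups 0

-- ===== PORT B =====
-- `while k < n and rev[k] == 0: k += 1` — the remaining suffix rev[k:] is the state
def trimB (r : List Int) : List Int :=
  match r with
  | [] => []
  | x :: rest => if x = 0 then trimB rest else x :: rest

-- `while k < n and rem > 0: …` on the reversed remainder (overwrite head, or pop head)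
def serveB (rem : Int) (r : List Int) : List Int :=
  if h : r ≠ [] ∧ 0 < rem then
    let v := r.head h.1
    if v > rem then (v - rem) :: r.tail
    else serveB (rem - v) r.tail
  else r
termination_by r.length
decreasing_by
  have := List.length_pos_of_ne_nil h.1
  rw [List.length_tail]; omega

-- the `while True:` loop of trip_lengths, accumulating `res.append(n - k)` per trip
-- (accumulator kept reversed, restored on return); fuel as in port A
def lengthsB (c : Int) (fuel : Nat) (r : List Int) (res : List Int) : List Int :=
  match fuel with
  | 0 => res.reverse
  | fuel + 1 =>
    let r' := trimB r
    if r' = [] then res.reverse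
    else lengthsB c fuel (serveB c r') ((r'.length : Int) :: res)

-- `for t in range(max(len(lens_d), len(lens_p))): total += 2 * max(a, b)` with 0-padding
def mergeB (lensD lensP : List Int) (total : Int) : Int :=
  match lensD, lensP with
  | [], [] => total
  | a :: as_, [] => mergeB as_ [] (total + 2 * max a 0)
  | [], b :: bs => mergeB [] bs (total + 2 * max 0 b)
  | a :: as_, b :: bs => mergeB as_ bs (total + 2 * max a b)
termination_by lensD.length + lensP.length

def solution_alt (capacity : Int) (num_of_stops : Int) (deliveries : List Int) (pickups : List Int) : Int :=
  mergeB
    (lengthsB capacity ((deliveries.map Int.natAbs).sum + deliveries.length + 1) deliveries.reverse [])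
    (lengthsB capacity ((pickups.map Int.natAbs).sum + pickups.length + 1) pickups.reverse [])
    0

-- ===== PRECONDITION & SPEC =====
-- Pre_ excludes exactly the inputs where the Python A never returns: with capacity ≤ 0 and any
-- nonzero demand its outer loop runs forever (no trip can remove anything).
def Pre_solution (capacity : Int) (num_of_stops : Int) (deliveries : List Int) (pickups : List Int) : Prop :=
  1 ≤ capacity ∨ ((∀ x ∈ deliveries, x = 0) ∧ (∀ x ∈ pickups, x = 0))
instance (capacity : Int) (num_of_stops : Int) (deliveries : List Int) (pickups : List Int) : Decidable (Pre_solution capacity num_of_stops deliveries pickups) := by unfold Pre_solution; infer_instance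

def pvWitness_solution : Int × Int × List Int × List Int := (4, 4, [1, 0, 3, 2], [0, 3, -2, 4])

def Spec_solution (capacity : Int) (num_of_stops : Int) (deliveries : List Int) (pickups : List Int) (out : Int) : Prop := out = solution_alt capacity num_of_stops deliveries pickups
instance (capacity : Int) (num_of_stops : Int) (deliveries : List Int) (pickups : List Int) (out : Int) : Decidable (Spec_solution capacity num_of_stops deliveries pickups out) := by unfold Spec_solution; infer_instance

-- ===== CLAIM (what is proved, stated in full; the proofs are below) =====
def Claim_equal_solution : Prop := ∀ (capacity : Int) (num_of_stops : Int) (deliveries : List Int) (pickups : List Int), Dom_solution capacity num_of_stops deliveries pickups → Pre_solution capacity num_of_stops deliveries pickups → Spec_solution capacity num_of_stops deliveries pickups (solution capacity num_of_stops deliveries pickups)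

-- ===== LEMMAS AND PROOFS =====

-- A's per-trip schedule for ONE list, in A's own (unreversed) representation
def lengthsA (c : Int) (fuel : Nat) (l : List Int) : List Int :=
  match fuel with
  | 0 => []
  | fuel + 1 =>
    let l' := trimA l
    if l' = [] then []
    else (l'.length : Int) :: lengthsA c fuel (serveA c l')

def natAbsSum (l : List Int) : Nat := (l.map Int.natAbs).sum

-- pure (non-accumulator) forms of B's two loops, used by the proofs
def mergeM (lensD lensP : List Int) : Int :=
  match lensD, lensP with
  | [], [] => 0
  | a :: as_, [] => 2 * max a 0 + mergeM as_ []
  | [], b :: bs => 2 * max 0 b + mergeM [] bs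
  | a :: as_, b :: bs => 2 * max a b + mergeM as_ bs
termination_by lensD.length + lensP.length

theorem mergeB_eq : ∀ (lensD lensP : List Int) (total : Int),
    mergeB lensD lensP total = total + mergeM lensD lensP := by
  intro lensD lensP
  fun_induction mergeM lensD lensP with
  | case1 => intro total; simp only [mergeB]; ring
  | case2 a as_ ih => intro total; simp only [mergeB, ih]; ring
  | case3 b bs ih => intro total; simp only [mergeB, ih]; ring
  | case4 a as_ b bs ih => intro total; simp only [mergeB, ih]; ring

-- reverse coupling: B's state r represents A's list r.reverse
theorem trimB_reverse : ∀ r : List Int, trimA r.reverse = (trimB r).reverse := by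
  intro r
  induction r with
  | nil => rw [trimA]; simp [trimB]
  | cons x rest ih =>
    rw [trimB]
    by_cases hx : x = 0
    · subst hx
      rw [List.reverse_cons, trimA]
      simp [ih]
    · rw [List.reverse_cons, trimA]
      simp [hx]

theorem serveB_reverse : ∀ (rem : Int) (r : List Int),
    serveA rem r.reverse = (serveB rem r).reverse := by
  intro rem r
  fun_induction serveB rem r with
  | case1 rem r h v hv =>
    rw [serveA]
    have hrev : r.reverse ≠ [] := by simp [h.1]
    rw [dif_pos ⟨hrev, h.2⟩]
    simp only [List.getLast_reverse, List.dropLast_reverse]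
    rw [if_pos hv]
    simp
    rfl
  | case2 rem r h v hv ih =>
    rw [serveA]
    have hrev : r.reverse ≠ [] := by simp [h.1]
    rw [dif_pos ⟨hrev, h.2⟩]
    simp only [List.getLast_reverse, List.dropLast_reverse]
    rw [if_neg hv]
    exact ih
  | case3 rem r h =>
    rw [serveA, dif_neg (by simp only [ne_eq, List.reverse_eq_nil_iff]; exact h)]

theorem lengthsB_reverse (c : Int) : ∀ (fuel : Nat) (r res : List Int),
    lengthsB c fuel r res = res.reverse ++ lengthsA c fuel r.reverse := by
  intro fuel
  induction fuel with
  | zero => intro r res; simp [lengthsB, lengthsA]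
  | succ fuel ih =>
    intro r res
    rw [lengthsB, lengthsA]
    simp only [trimB_reverse]
    by_cases h : trimB r = []
    · simp [h]
    · rw [if_neg h, if_neg (by simpa using h), serveB_reverse, ih]
      simp

theorem trimA_nil : trimA [] = [] := by rw [trimA]; simp

theorem serveA_nil (rem : Int) : serveA rem [] = [] := by rw [serveA]; simp

theorem lengthsA_nil (c : Int) : ∀ fuel, lengthsA c fuel [] = [] := by
  intro fuel
  cases fuel with
  | zero => rfl
  | succ fuel => rw [lengthsA]; simp [trimA_nil]

-- A's combined loop = merged independent schedules
theorem loopA_merge (c : Int) : ∀ (fuel : Nat) (ds ps : List Int) (total : Int),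
    loopA c fuel ds ps total = total + mergeM (lengthsA c fuel ds) (lengthsA c fuel ps) := by
  intro fuel
  induction fuel with
  | zero => intro ds ps total; simp [loopA, lengthsA, mergeM]
  | succ fuel ih =>
    intro ds ps total
    rw [loopA]
    rw [lengthsA, lengthsA]
    by_cases hd : trimA ds = [] <;> by_cases hp : trimA ps = []
    · simp [hd, hp, mergeM]
    · rw [if_neg (by simp [hd, hp]), ih, if_pos hd, if_neg hp, hd, serveA_nil]
      rw [lengthsA_nil, mergeM]
      simp
      ring
    · rw [if_neg (by simp [hd, hp]), ih, if_neg hd, if_pos hp, hp, serveA_nil]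
      rw [lengthsA_nil, mergeM]
      simp
      ring
    · rw [if_neg (by simp [hd, hp]), ih, if_neg hd, if_neg hp, mergeM]
      ring

-- fuel accounting: one trip strictly decreases the natAbs-sum
theorem natAbsSum_concat (A : List Int) (x : Int) :
    natAbsSum (A ++ [x]) = natAbsSum A + x.natAbs := by
  simp [natAbsSum]

theorem trimA_natAbsSum : ∀ l : List Int, natAbsSum (trimA l) = natAbsSum l := by
  intro l
  fun_induction trimA l with
  | case1 l h ih =>
    have hconc := List.dropLast_append_getLast? 0 h
    conv_rhs => rw [← hconc]
    rw [natAbsSum_concat, ih]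
    simp
  | case2 l h => rfl

theorem serveA_natAbsSum_le : ∀ (rem : Int) (l : List Int),
    natAbsSum (serveA rem l) ≤ natAbsSum l := by
  intro rem l
  fun_induction serveA rem l with
  | case1 rem l h x hx =>
    have hconc := List.dropLast_append_getLast h.1
    conv_rhs => rw [← hconc]
    rw [natAbsSum_concat, natAbsSum_concat]
    have h2 := h.2
    omega
  | case2 rem l h x hx ih =>
    have hconc := List.dropLast_append_getLast h.1
    conv_rhs => rw [← hconc]
    rw [natAbsSum_concat]
    omega
  | case3 rem l h => exact le_refl _

theorem trimA_last : ∀ {l : List Int}, trimA l = [] ∨ (trimA l).getLast? ≠ some 0 := by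
  intro l
  fun_induction trimA l with
  | case1 l h ih => exact ih
  | case2 l h => exact Or.inr h

theorem serveA_natAbsSum_lt {rem : Int} {l : List Int} (hrem : 0 < rem) (hne : l ≠ [])
    (hlast : l.getLast? ≠ some 0) : natAbsSum (serveA rem l) < natAbsSum l := by
  have hx0 : l.getLast hne ≠ 0 := by
    intro h0
    exact hlast (by rw [List.getLast?_eq_some_getLast hne, h0])
  have hconc := List.dropLast_append_getLast hne
  rw [serveA, dif_pos ⟨hne, hrem⟩]
  by_cases hx : l.getLast hne > rem
  · rw [if_pos hx]
    conv_rhs => rw [← hconc]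
    rw [natAbsSum_concat, natAbsSum_concat]
    omega
  · rw [if_neg hx]
    have hle := serveA_natAbsSum_le (rem - l.getLast hne) l.dropLast
    conv_rhs => rw [← hconc]
    rw [natAbsSum_concat]
    omega

theorem lengthsA_stable {c : Int} (hc : 1 ≤ c) : ∀ (f1 f2 : Nat) (l : List Int),
    natAbsSum l < f1 → natAbsSum l < f2 → lengthsA c f1 l = lengthsA c f2 l := by
  intro f1
  induction f1 with
  | zero => intro f2 l h1; omega
  | succ f1 ih =>
    intro f2 l h1 h2
    cases f2 with
    | zero => omega
    | succ f2 =>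
      rw [lengthsA, lengthsA]
      by_cases h : trimA l = []
      · simp [h]
      · rw [if_neg h, if_neg h]
        have hlast := (trimA_last (l := l)).resolve_left h
        have hlt : natAbsSum (serveA c (trimA l)) < natAbsSum l := by
          have := serveA_natAbsSum_lt (rem := c) (by omega) h hlast
          have := trimA_natAbsSum l
          omega
        rw [ih f2 (serveA c (trimA l)) (by omega) (by omega)]

-- the all-zero degenerate branch of Pre_
theorem trimA_eq_nil_of_zero {l : List Int} (h : ∀ x ∈ l, x = 0) : trimA l = [] := by
  fun_induction trimA l with
  | case1 l h' ih => exact ih (fun x hx => h x (List.mem_of_mem_dropLast hx))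
  | case2 l h' =>
    cases hl : l with
    | nil => rfl
    | cons y t =>
      exfalso
      apply h'
      rw [List.getLast?_eq_some_getLast (by simp [hl])]
      subst hl
      rw [h _ (List.getLast_mem _)]

theorem natAbsSum_eq_zero_of_zero {l : List Int} (h : ∀ x ∈ l, x = 0) : natAbsSum l = 0 := by
  induction l with
  | nil => rfl
  | cons x rest ih =>
    rw [natAbsSum] at *
    simp only [List.map_cons, List.sum_cons]
    rw [h x (by simp), ih (fun y hy => h y (by simp [hy]))]
    rfl

-- ===== VERDICT (by name: the statement is the Claim_ definition above) =====
theorem solution_spec : Claim_equal_solution := by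
  intro c n ds ps _ hpre
  unfold Spec_solution solution solution_alt
  rw [lengthsB_reverse, lengthsB_reverse, List.reverse_reverse, List.reverse_reverse,
    List.reverse_nil, List.nil_append, List.nil_append, mergeB_eq]
  rcases hpre with hc | ⟨hz1, hz2⟩
  · rw [loopA_merge,
      lengthsA_stable hc ((ds.map Int.natAbs).sum + (ps.map Int.natAbs).sum + 1)
        ((ds.map Int.natAbs).sum + ds.length + 1) ds
        (by simp [natAbsSum]) (by simp [natAbsSum]),
      lengthsA_stable hc ((ds.map Int.natAbs).sum + (ps.map Int.natAbs).sum + 1)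
        ((ps.map Int.natAbs).sum + ps.length + 1) ps
        (by simp [natAbsSum]) (by simp [natAbsSum])]
  · have e1 := natAbsSum_eq_zero_of_zero hz1
    have e2 := natAbsSum_eq_zero_of_zero hz2
    simp only [natAbsSum] at e1 e2
    rw [e1, e2]
    simp [loopA, lengthsA, trimA_eq_nil_of_zero hz1, trimA_eq_nil_of_zero hz2, mergeM]
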